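-- pv_equiv track=rewrite | github.com/suribe06/mafpin | networks/communities/detection.py | compute_node_community_membership
-- ===== SOURCE A (Python) =====
-- def compute_node_community_membership(
--     node_ids: list[int],
--     communities: list[list[int]],
-- ) -> dict[int, set[int]]:
--     """
--     Map each node to the set of community indices it belongs to.
--
--     Args:
--         node_ids:    All node IDs (used to guarantee every node appears).
--         communities: List of community node lists.
--
--     Returns:
--         Dict mapping node_id → set of zero-based community indices.
--     """
--     membership: dict[int, set[int]] = {nid: set() for nid in node_ids}
--     for com_idx, community in enumerate(communities):
--         for node in community:
--             if node in membership:
--                 membership[node].add(com_idx)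
--     return membership
-- ===== SOURCE B (Python) =====
-- def compute_node_community_membership(
--     node_ids: list[int],
--     communities: list[list[int]],
-- ) -> dict[int, set[int]]:
--     """Per-node dict/set comprehension: for each node, collect the indices
--     of the communities that contain it."""
--     return {
--         nid: {idx for idx, com in enumerate(communities) if nid in com}
--         for nid in node_ids
--     }
-- ===== Notes on version B (the rewrite author's own statement) =====
-- stated objective: simpler
-- what changed: A builds an empty set per node and then sweeps all community entries updating a mutable dict; B inverts the loops into a single dict/set comprehension that, per node, scans the enumerated communities for membership.
import Mathlib
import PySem

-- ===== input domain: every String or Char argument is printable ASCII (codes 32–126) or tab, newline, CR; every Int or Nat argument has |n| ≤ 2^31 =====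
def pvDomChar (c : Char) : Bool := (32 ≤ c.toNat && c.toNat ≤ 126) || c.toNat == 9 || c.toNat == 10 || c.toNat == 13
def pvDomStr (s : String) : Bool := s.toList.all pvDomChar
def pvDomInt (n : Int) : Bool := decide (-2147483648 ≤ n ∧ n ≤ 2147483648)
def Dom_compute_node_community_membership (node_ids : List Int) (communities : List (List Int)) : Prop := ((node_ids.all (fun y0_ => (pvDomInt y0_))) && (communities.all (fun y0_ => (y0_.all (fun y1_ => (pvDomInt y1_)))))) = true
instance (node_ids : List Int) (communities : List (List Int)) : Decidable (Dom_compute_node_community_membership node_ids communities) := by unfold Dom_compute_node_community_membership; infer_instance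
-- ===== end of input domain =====

-- B replaces A's mutable-dict sweep over all community entries by a per-node
-- dict/set comprehension (simpler, one expression); same return value.


-- ===== PORT A =====
def compute_node_community_membership (node_ids : List Int) (communities : List (List Int)) : List (Int × List Int) :=
  let membership : PySem.Dict Int (PySem.Set Int) :=
    node_ids.foldl (fun d nid => d.insert nid PySem.Set.empty) PySem.Dict.empty
  let membership :=
    (PySem.List.enumerate communities).foldl
      (fun d p =>
        p.2.foldl
          (fun d node =>
            if d.contains node then d.modify node PySem.Set.empty (fun s => PySem.Set.add s p.1)
            else d)
          d)
      membership
  membership.items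

-- ===== PORT B =====
def compute_node_community_membership_alt (node_ids : List Int) (communities : List (List Int)) : List (Int × List Int) :=
  (node_ids.foldl
    (fun d nid =>
      d.insert nid
        ((PySem.List.enumerate communities).foldl
          (fun s p => if p.2.contains nid then PySem.Set.add s p.1 else s)
          PySem.Set.empty))
    (PySem.Dict.empty : PySem.Dict Int (PySem.Set Int))).items

-- ===== PRECONDITION & SPEC =====
def Spec_compute_node_community_membership (node_ids : List Int) (communities : List (List Int)) (out : List (Int × List Int)) : Prop := out = compute_node_community_membership_alt node_ids communities
instance (node_ids : List Int) (communities : List (List Int)) (out : List (Int × List Int)) : Decidable (Spec_compute_node_community_membership node_ids communities out) := by unfold Spec_compute_node_community_membership; infer_instance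

-- ===== CLAIM (what is proved, stated in full; the proofs are below) =====
def Claim_equal_compute_node_community_membership : Prop := ∀ (node_ids : List Int) (communities : List (List Int)), Dom_compute_node_community_membership node_ids communities → Spec_compute_node_community_membership node_ids communities (compute_node_community_membership node_ids communities)

-- ===== LEMMAS AND PROOFS =====

-- step of A's inner loop (over one community, index i)
def pvStepA (i : Int) (d : PySem.Dict Int (PySem.Set Int)) (node : Int) : PySem.Dict Int (PySem.Set Int) :=
  if d.contains node then d.modify node PySem.Set.empty (fun s => PySem.Set.add s i) else d

-- A's initial dict maps every key's lookup-with-default to ∅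
theorem pv_init_getD (l : List Int) (d : PySem.Dict Int (PySem.Set Int))
    (h : ∀ k, d.getD k PySem.Set.empty = PySem.Set.empty) :
    ∀ k, (l.foldl (fun d nid => d.insert nid PySem.Set.empty) d).getD k PySem.Set.empty = PySem.Set.empty := by
  induction l generalizing d with
  | nil => exact h
  | cons x xs ih =>
    intro k
    refine ih _ (fun k => ?_) k
    rw [PySem.Dict.getD_insert]
    split
    · rfl
    · exact h k

-- contains is invariant under A's inner loop
theorem pv_innerA_contains (c : List Int) (i : Int) (d : PySem.Dict Int (PySem.Set Int)) (k : Int) :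
    ((c.foldl (pvStepA i) d).contains k) = d.contains k := by
  induction c generalizing d with
  | nil => rfl
  | cons node rest ih =>
    rw [List.foldl_cons, ih]
    unfold pvStepA
    by_cases h : d.contains node = true
    · simp only [h, if_true, PySem.Dict.contains_modify]
      by_cases hk : k = node
      · subst hk; simp [h]
      · simp [hk]
    · simp [h]

-- lookup after A's inner loop over community c with index i
theorem pv_innerA_getD (c : List Int) (i : Int) (d : PySem.Dict Int (PySem.Set Int)) (k : Int) :
    (c.foldl (pvStepA i) d).getD k PySem.Set.empty =
      if d.contains k = true ∧ k ∈ c then PySem.Set.add (d.getD k PySem.Set.empty) i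
      else d.getD k PySem.Set.empty := by
  induction c generalizing d with
  | nil => simp
  | cons node rest ih =>
    rw [List.foldl_cons, ih]
    unfold pvStepA
    by_cases hn : d.contains node = true
    · simp only [hn, if_true, PySem.Dict.contains_modify, PySem.Dict.getD_modify]
      by_cases hk : k = node
      · subst hk
        simp only [BEq.rfl, Bool.true_or, hn, true_and, List.mem_cons, true_or, if_true]
        by_cases hr : k ∈ rest
        · rw [if_pos hr]
          exact PySem.Set.add_of_mem (by simp [PySem.Set.mem_add])
        · rw [if_neg hr]
      · have hb : (k == node) = false := by simp [hk]
        simp only [hb, Bool.false_or, if_neg hk, List.mem_cons]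
        by_cases hck : d.contains k = true
        · by_cases hr : k ∈ rest <;> simp [hck, hr, hk]
        · simp [hck]
    · rw [if_neg hn]
      by_cases hk : k = node
      · subst hk
        simp [hn]
      · simp [List.mem_cons, hk]

-- keys are invariant under A's loops (modify under a contains-guard never adds a key)
theorem pv_innerA_keys (c : List Int) (i : Int) (d : PySem.Dict Int (PySem.Set Int)) :
    (c.foldl (pvStepA i) d).keys = d.keys := by
  induction c generalizing d with
  | nil => rfl
  | cons node rest ih =>
    rw [List.foldl_cons, ih]
    unfold pvStepA
    by_cases hn : d.contains node = true
    · rw [if_pos hn, PySem.Dict.keys_modify, PySem.Dict.keys_insert_of_contains _ _ hn]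
    · rw [if_neg hn]

theorem pv_outerA_keys (l : List (Int × List Int)) (d : PySem.Dict Int (PySem.Set Int)) :
    (l.foldl (fun d p => p.2.foldl (pvStepA p.1) d) d).keys = d.keys := by
  induction l generalizing d with
  | nil => rfl
  | cons p rest ih => rw [List.foldl_cons, ih, pv_innerA_keys]

-- lookup after A's outer loop = B's per-key set comprehension folded from the old value
theorem pv_outerA_getD (l : List (Int × List Int)) (d : PySem.Dict Int (PySem.Set Int)) (k : Int)
    (hk : d.contains k = true) :
    (l.foldl (fun d p => p.2.foldl (pvStepA p.1) d) d).getD k PySem.Set.empty =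
      l.foldl (fun s p => if p.2.contains k then PySem.Set.add s p.1 else s) (d.getD k PySem.Set.empty) := by
  induction l generalizing d with
  | nil => rfl
  | cons p rest ih =>
    rw [List.foldl_cons, List.foldl_cons,
      ih _ (by rw [pv_innerA_contains]; exact hk), pv_innerA_getD]
    congr 1
    by_cases hm : k ∈ p.2
    · simp [hk, hm]
    · simp [hk, hm]

-- lookup in B's dict, for keys in node_ids
theorem pv_B_getD (V : Int → PySem.Set Int) (l : List Int) (d : PySem.Dict Int (PySem.Set Int)) (k : Int) :
    (l.foldl (fun d nid => d.insert nid (V nid)) d).getD k PySem.Set.empty =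
      if k ∈ l then V k else d.getD k PySem.Set.empty := by
  induction l generalizing d with
  | nil => simp
  | cons x xs ih =>
    rw [List.foldl_cons, ih, PySem.Dict.getD_insert]
    by_cases hx : k ∈ xs
    · simp [hx]
    · by_cases hk : k = x
      · subst hk; simp [hx]
      · simp [hx, hk]

-- ===== VERDICT (by name: the statement is the Claim_ definition above) =====
theorem compute_node_community_membership_spec : Claim_equal_compute_node_community_membership := by
  intro node_ids communities _
  unfold Spec_compute_node_community_membership compute_node_community_membership compute_node_community_membership_alt
  simp only []
  set l := PySem.List.enumerate communities with hl
  set d0 : PySem.Dict Int (PySem.Set Int) :=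
    node_ids.foldl (fun d nid => d.insert nid PySem.Set.empty) PySem.Dict.empty with hd0
  set dA := l.foldl (fun d p => p.2.foldl (pvStepA p.1) d) d0 with hdA
  set dB : PySem.Dict Int (PySem.Set Int) :=
    node_ids.foldl
      (fun d nid => d.insert nid
        (l.foldl (fun s p => if p.2.contains nid then PySem.Set.add s p.1 else s) PySem.Set.empty))
      PySem.Dict.empty with hdB
  show dA.items = dB.items
  have hkeys0 : d0.keys = PySem.Set.ofList node_ids := by
    rw [hd0, PySem.Dict.keys_foldl_insert node_ids (fun _ _ => PySem.Set.empty)]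
    simp [PySem.Set.update_nil_left, PySem.Dict.keys_empty]
  have hkeysA : dA.keys = PySem.Set.ofList node_ids := by
    rw [hdA, pv_outerA_keys, hkeys0]
  have hkeysB : dB.keys = PySem.Set.ofList node_ids := by
    rw [hdB, PySem.Dict.keys_foldl_insert]
    simp [PySem.Set.update_nil_left, PySem.Dict.keys_empty]
  rw [PySem.Dict.items_eq_map_keys dA (by rw [hkeysA]; exact PySem.Set.nodup_ofList _) PySem.Set.empty,
      PySem.Dict.items_eq_map_keys dB (by rw [hkeysB]; exact PySem.Set.nodup_ofList _) PySem.Set.empty,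
      hkeysA, hkeysB]
  apply List.map_congr_left
  intro k hkmem
  have hkmem' : k ∈ node_ids := (PySem.Set.mem_ofList _ _).mp hkmem
  have hc0 : d0.contains k = true := by
    rw [PySem.Dict.contains_eq_decide_mem_keys, hkeys0]
    simp [PySem.Set.mem_ofList, hkmem']
  have h0 : d0.getD k PySem.Set.empty = PySem.Set.empty :=
    pv_init_getD node_ids PySem.Dict.empty (by simp [PySem.Dict.getD_empty]) k
  rw [hdA, pv_outerA_getD l d0 k hc0, h0, hdB, pv_B_getD, if_pos hkmem']
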